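-- pv_equiv track=rewrite | github.com/KoKwanwun/Algorithm | Programmers/Level-2/택배상자.py | solution
-- ===== SOURCE A (Python) =====
-- def solution(order):
--     answer = 0
--
--     # pop을 사용하기 위해 내림차순
--     boxs = list(range(max(order), 0, -1))
--     stack = []
--
--     for each in order:
--         # stack의 최상위 원소와 같다면
--         # 이 if문이 while문 아래에 있다면 오류가 발생할 수 있음
--         if stack != [] and stack[-1] == each:
--             answer += 1
--             stack.pop()
--             continue
--
--         # order의 현재 원소가 boxs의 원소보다 크다면 stack에 계속 쌓기
--         while boxs != [] and boxs[-1] < each: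
--             stack.append(boxs.pop())
--
--         # boxs의 원소와 같다면
--         if boxs != [] and boxs[-1] == each:
--             answer += 1
--             boxs.pop()
--             continue
--
--         # 그 외는 break
--         break
--
--     return answer
-- ===== SOURCE B (Python) =====
-- def _top(parent, hi):
--     # largest not-yet-delivered box number <= hi (0 if none):
--     # follow the pointer chain of delivered boxes downward
--     while hi in parent:
--         hi = parent[hi]
--     return hi
--
--
-- def solution(order):
--     answer = 0
--     hi = 0        # highest box number taken off the belt so far
--     parent = {}   # delivered box -> a smaller candidate with nothing undelivered in between
--
--     for each in order:
--         if each > hi: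
--             # box `each` is still on the belt: take the belt up to it and deliver it
--             parent[each] = each - 1
--             hi = each
--             answer += 1
--         else:
--             top = _top(parent, hi)
--             if top == each and each > 0:
--                 parent[each] = each - 1
--                 parent[hi] = each - 1   # compress: skip the scanned delivered block next time
--                 answer += 1
--             else:
--                 break
--
--     return answer
-- ===== Notes on version B (the rewrite author's own statement) =====
-- stated objective: faster
-- what changed: B removes both the prebuilt descending box list and the explicit stack: it keeps a dict of delivered boxes with downward skip pointers (union-find-style pointer jumping with compression), using the fact that A's stack top is always the largest undelivered box number below the belt position.
-- crash fix: On the empty list A raises ValueError (max of empty sequence); B returns 0. — e.g. on solution([]): A raises ValueError, B returns 0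
import Mathlib
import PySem

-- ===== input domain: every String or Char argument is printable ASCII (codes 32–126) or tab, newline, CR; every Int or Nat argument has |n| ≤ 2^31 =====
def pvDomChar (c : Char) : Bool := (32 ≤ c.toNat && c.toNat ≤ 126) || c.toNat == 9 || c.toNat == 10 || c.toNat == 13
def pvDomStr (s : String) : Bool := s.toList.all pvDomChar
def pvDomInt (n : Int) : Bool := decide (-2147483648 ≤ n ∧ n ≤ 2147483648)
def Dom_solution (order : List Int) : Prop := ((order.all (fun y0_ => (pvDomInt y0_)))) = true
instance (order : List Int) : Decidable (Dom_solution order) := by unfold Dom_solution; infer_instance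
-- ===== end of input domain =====

-- B replaces A's descending belt list AND its explicit stack by a dict of delivered boxes with
-- downward skip pointers (pointer jumping); return values proved equal for every non-empty order.

-- ===== PORT A =====
-- the inner `while boxs != [] and boxs[-1] < each: stack.append(boxs.pop())`
def solAWhile (each : Int) (boxs stack : List Int) : List Int × List Int :=
  if hne : boxs ≠ [] then
    let b := boxs.getLast hne
    if b < each then solAWhile each boxs.dropLast (stack ++ [b])
    else (boxs, stack)
  else (boxs, stack)
  termination_by boxs.length
  decreasing_by
    simp [List.length_dropLast]
    exact List.length_pos_iff.mpr hne

-- the `for each in order` loop with its `continue`s and final `break`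
def solALoop : List Int → List Int → List Int → Int → Int
  | [], _, _, ans => ans
  | each :: rest, boxs, stack, ans =>
    if stack ≠ [] ∧ stack.getLast? = some each then
      solALoop rest boxs stack.dropLast (ans + 1)
    else
      if (solAWhile each boxs stack).1 ≠ [] ∧
         (solAWhile each boxs stack).1.getLast? = some each then
        solALoop rest (solAWhile each boxs stack).1.dropLast
          (solAWhile each boxs stack).2 (ans + 1)
      else ans

def solution (order : List Int) : Int :=
  match PySem.List.max? order (fun x => x) with
  | none => 0   -- unreachable: Python A raises ValueError on empty order (outside Pre_)
  | some m => solALoop order (PySem.List.pyRange m 0 (-1)) [] 0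

-- ===== PORT B =====
-- `while hi in parent: hi = parent[hi]`; the fuel is only a totality guard: under the loop's
-- pointer invariant the chain visits distinct keys, so parent.size + 1 steps always suffice
def findB (parent : PySem.Dict Int Int) : Nat → Int → Int
  | 0, x => x
  | fuel + 1, x =>
    match PySem.Dict.get? parent x with
    | none => x
    | some v => findB parent fuel v

-- the `for each in order` loop of B
def solBLoop : List Int → Int → PySem.Dict Int Int → Int → Int
  | [], _, _, ans => ans
  | each :: rest, hi, parent, ans =>
    if hi < each then
      solBLoop rest each (parent.insert each (each - 1)) (ans + 1)
    else
      if findB parent (parent.size + 1) hi = each ∧ 0 < each then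
        solBLoop rest hi ((parent.insert each (each - 1)).insert hi (each - 1)) (ans + 1)
      else ans

def solution_alt (order : List Int) : Int := solBLoop order 0 PySem.Dict.empty 0

-- ===== PRECONDITION & SPEC =====
-- Pre_ excludes only the empty list, on which Python A raises ValueError (max of empty sequence).
def Pre_solution (order : List Int) : Prop := order ≠ []
instance (order : List Int) : Decidable (Pre_solution order) := by unfold Pre_solution; infer_instance
def pvWitness_solution : List Int := [2, 1, 3]

-- On the empty list A raises ValueError (max() of empty sequence); B returns 0.
def Raises_solution (order : List Int) : Prop := order = []
instance (order : List Int) : Decidable (Raises_solution order) := by unfold Raises_solution; infer_instance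
def pvRaiseWitness_solution : List Int := []
def pvRaiseWitnessOut_solution : Int := 0

def Spec_solution (order : List Int) (out : Int) : Prop := out = solution_alt order
instance (order : List Int) (out : Int) : Decidable (Spec_solution order out) := by unfold Spec_solution; infer_instance

-- ===== CLAIM (what is proved, stated in full; the proofs are below) =====
def Claim_equal_solution : Prop := ∀ (order : List Int), Dom_solution order → Pre_solution order → Spec_solution order (solution order)
def Claim_raises_solution : Prop := (∀ (order : List Int), Dom_solution order → Raises_solution order → ¬ Pre_solution order) ∧ (Dom_solution (pvRaiseWitness_solution) ∧ Raises_solution (pvRaiseWitness_solution) ∧ solution_alt (pvRaiseWitness_solution) = pvRaiseWitnessOut_solution)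

-- ===== LEMMAS AND PROOFS =====

-- A's remaining belt `boxs` at position c (next belt box) is the reversed ascending range [c, m+1)
def beltOf (m c : Int) : List Int := (PySem.List.pyRange c (m + 1) 1).reverse

-- B's pointer invariant: every delivered box k points to some 0 ≤ v < k with everything in (v, k)
-- delivered too; keys lie in [1, hi]
def Ptr (parent : PySem.Dict Int Int) (hi : Int) : Prop :=
  ∀ k v, parent.get? k = some v →
    1 ≤ k ∧ k ≤ hi ∧ 0 ≤ v ∧ v < k ∧ ∀ y, v < y → y < k → parent.contains y = true

-- the undelivered boxes at or below hi, ascending = A's stack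
def undeliv (parent : PySem.Dict Int Int) (hi : Int) : List Int :=
  (PySem.List.pyRange 1 (hi + 1) 1).filter (fun x => !(PySem.Dict.contains parent x))

lemma belt_getLast? (m c : Int) :
    (beltOf m c).getLast? = if c ≤ m then some c else none := by
  by_cases h : c ≤ m
  · rw [beltOf, PySem.List.pyRange_one_cons (by omega)]
    simp [h]
  · rw [beltOf, PySem.List.pyRange_one_eq_nil (by omega)]
    simp [h]

lemma belt_dropLast (m c : Int) (h : c ≤ m) :
    (beltOf m c).dropLast = beltOf m (c + 1) := by
  rw [beltOf, PySem.List.pyRange_one_cons (by omega)]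
  simp [beltOf]

-- the while loop moves the belt from c up to `each`
lemma whileA_eq (m each : Int) (he : each ≤ m) :
    ∀ c stack, c ≤ each →
      solAWhile each (beltOf m c) stack =
        (beltOf m each, stack ++ PySem.List.pyRange c each 1) := by
  intro c stack hce
  rw [solAWhile.eq_def]
  have hcm : c ≤ m := le_trans hce he
  have hne : beltOf m c ≠ [] := by
    intro hn
    have h2 := belt_getLast? m c
    rw [hn, if_pos hcm] at h2
    simp at h2
  have hb : (beltOf m c).getLast hne = c := by
    have h2 := List.getLast?_eq_some_getLast hne
    rw [belt_getLast?, if_pos hcm] at h2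
    exact (Option.some_inj.mp h2).symm
  rw [dif_pos hne]
  dsimp only
  rw [hb]
  by_cases hlt : c < each
  · rw [if_pos hlt, belt_dropLast m c hcm]
    rw [whileA_eq m each he (c + 1) (stack ++ [c]) (by omega)]
    rw [PySem.List.pyRange_one_cons hlt]
    simp
  · rw [if_neg hlt]
    have : c = each := by omega
    subst this
    rw [PySem.List.pyRange_one_eq_nil (by omega)]
    simp
  termination_by c _ => (each - c).toNat
  decreasing_by omega

lemma whileA_noop (m each c : Int) (h : each < c) (stack : List Int) :
    solAWhile each (beltOf m c) stack = (beltOf m c, stack) := by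
  rw [solAWhile.eq_def]
  by_cases hne : beltOf m c ≠ []
  · have hb : (beltOf m c).getLast hne = c := by
      have hcm : c ≤ m := by
        by_contra hc
        exact hne (by rw [beltOf, PySem.List.pyRange_one_eq_nil (by omega)]; rfl)
      have h2 := List.getLast?_eq_some_getLast hne
      rw [belt_getLast?, if_pos hcm] at h2
      exact (Option.some_inj.mp h2).symm
    rw [dif_pos hne]
    dsimp only
    rw [hb, if_neg (by omega)]
  · rw [dif_neg hne]

lemma find_props (parent : PySem.Dict Int Int) (hi : Int) (hptr : Ptr parent hi) :
    ∀ fuel x, 0 ≤ x →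
      0 ≤ findB parent fuel x ∧ findB parent fuel x ≤ x ∧
      ∀ y, findB parent fuel x < y → y ≤ x → parent.contains y = true := by
  intro fuel
  induction fuel with
  | zero =>
    intro x hx
    simp only [findB]
    exact ⟨hx, le_refl x, fun y h1 h2 => by omega⟩
  | succ n ih =>
    intro x hx
    simp only [findB]
    rcases hg : PySem.Dict.get? parent x with _ | v
    all_goals dsimp only
    · exact ⟨hx, le_refl x, fun y h1 h2 => by omega⟩
    · obtain ⟨hk1, hk2, hv0, hvk, hmid⟩ := hptr x v hg
      obtain ⟨ih1, ih2, ih3⟩ := ih v hv0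
      refine ⟨ih1, le_trans ih2 (le_of_lt hvk), fun y h1 h2 => ?_⟩
      by_cases hy : y ≤ v
      · exact ih3 y h1 hy
      · by_cases hyx : y = x
        · subst hyx
          rw [PySem.Dict.contains_eq_isSome_get?, hg]
          rfl
        · exact hmid y (by omega) (by omega)

lemma find_not_contains (parent : PySem.Dict Int Int) (hi : Int) (hptr : Ptr parent hi) :
    ∀ fuel x, ((PySem.List.pyRange 1 (x + 1) 1).filter
        (fun y => PySem.Dict.contains parent y)).length < fuel →
      parent.contains (findB parent fuel x) = false := by
  intro fuel
  induction fuel with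
  | zero => intro x h; omega
  | succ n ih =>
    intro x h
    simp only [findB]
    rcases hg : PySem.Dict.get? parent x with _ | v
    all_goals dsimp only
    · rw [PySem.Dict.contains_eq_isSome_get?, hg]; rfl
    · obtain ⟨hk1, hk2, hv0, hvk, _⟩ := hptr x v hg
      apply ih v
      have hsplit : PySem.List.pyRange 1 (x + 1) 1 =
          PySem.List.pyRange 1 (v + 1) 1 ++ PySem.List.pyRange (v + 1) (x + 1) 1 :=
        PySem.List.pyRange_one_append 1 (v + 1) (x + 1) (by omega) (by omega)
      rw [hsplit, List.filter_append, List.length_append] at h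
      have hxmem : x ∈ (PySem.List.pyRange (v + 1) (x + 1) 1).filter
          (fun y => PySem.Dict.contains parent y) := by
        rw [List.mem_filter]
        refine ⟨(PySem.List.mem_pyRange_one).mpr ⟨by omega, by omega⟩, ?_⟩
        rw [PySem.Dict.contains_eq_isSome_get?, hg]
        rfl
      have : 1 ≤ ((PySem.List.pyRange (v + 1) (x + 1) 1).filter
          (fun y => PySem.Dict.contains parent y)).length :=
        List.length_pos_iff.mpr (List.ne_nil_of_mem hxmem)
      omega

lemma fuel_enough (parent : PySem.Dict Int Int) (x : Int) :
    ((PySem.List.pyRange 1 (x + 1) 1).filter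
        (fun y => PySem.Dict.contains parent y)).length < parent.size + 1 := by
  have hsub : (PySem.List.pyRange 1 (x + 1) 1).filter
      (fun y => PySem.Dict.contains parent y) ⊆ parent.keys := by
    intro y hy
    rw [List.mem_filter] at hy
    exact (PySem.Dict.contains_iff_mem_keys parent y).mp hy.2
  have hnd : ((PySem.List.pyRange 1 (x + 1) 1).filter
      (fun y => PySem.Dict.contains parent y)).Nodup :=
    (PySem.List.nodup_pyRange_one 1 (x + 1)).filter _
  have := (hnd.subperm hsub).length_le
  have hsz : parent.keys.length = parent.size := by
    simp [PySem.Dict.keys, PySem.Dict.size]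
  omega

lemma not_contains_of_gt (parent : PySem.Dict Int Int) (hi : Int) (hptr : Ptr parent hi)
    (x : Int) (hx : hi < x) : parent.contains x = false := by
  rcases hg : PySem.Dict.get? parent x with _ | v
  · rw [PySem.Dict.contains_eq_isSome_get?, hg]; rfl
  · exact absurd (hptr x v hg).2.1 (by omega)

lemma mem_undeliv (parent : PySem.Dict Int Int) (hi x : Int)
    (h : x ∈ undeliv parent hi) : 1 ≤ x ∧ x ≤ hi := by
  rw [undeliv, List.mem_filter] at h
  have := (PySem.List.mem_pyRange_one).mp h.1
  omega

-- A's stack decomposes at the largest undelivered box t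
lemma undeliv_split (parent : PySem.Dict Int Int) (hi t : Int)
    (h0t : 0 ≤ t) (hth : t ≤ hi)
    (hnc : parent.contains t = false)
    (habove : ∀ y, t < y → y ≤ hi → parent.contains y = true) :
    undeliv parent hi =
      (PySem.List.pyRange 1 t 1).filter (fun x => !(PySem.Dict.contains parent x)) ++
        (if 1 ≤ t then [t] else []) := by
  have hB : (PySem.List.pyRange (t + 1) (hi + 1) 1).filter
      (fun x => !(PySem.Dict.contains parent x)) = [] := by
    apply List.filter_eq_nil_iff.mpr
    intro x hx
    have hb := (PySem.List.mem_pyRange_one).mp hx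
    rw [habove x (by omega) (by omega)]
    simp
  have hA : (PySem.List.pyRange 1 (t + 1) 1).filter (fun x => !(PySem.Dict.contains parent x)) =
      (PySem.List.pyRange 1 t 1).filter (fun x => !(PySem.Dict.contains parent x)) ++
        (if 1 ≤ t then [t] else []) := by
    by_cases h1t : 1 ≤ t
    · rw [PySem.List.pyRange_one_succ_right (by omega : (1:Int) ≤ t), List.filter_append, if_pos h1t]
      congr 1
      simp [hnc]
    · rw [if_neg h1t, PySem.List.pyRange_one_eq_nil (by omega : t + 1 ≤ 1),
        PySem.List.pyRange_one_eq_nil (by omega : t ≤ 1)]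
      simp
  rw [undeliv, PySem.List.pyRange_one_append 1 (t + 1) (hi + 1) (by omega) (by omega),
    List.filter_append, hA, hB, List.append_nil]

-- main loop invariant
lemma loop_eq (m : Int) :
    ∀ (order : List Int) hi parent ans, 0 ≤ hi → hi ≤ m → (∀ e ∈ order, e ≤ m) →
      Ptr parent hi → (1 ≤ hi → parent.contains hi = true) →
      solALoop order (beltOf m (hi + 1)) (undeliv parent hi) ans = solBLoop order hi parent ans := by
  intro order
  induction order with
  | nil => intro hi parent ans _ _ _ _ _; rfl
  | cons each rest ih =>
    intro hi parent ans h0 hm hbd hptr hcont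
    have he : each ≤ m := hbd each (by simp)
    have hrest : ∀ e ∈ rest, e ≤ m := fun e hme => hbd e (by simp [hme])
    simp only [solALoop, solBLoop]
    by_cases hcase : hi < each
    · -- each is still on the belt
      have hfirst : ¬ (undeliv parent hi ≠ [] ∧ (undeliv parent hi).getLast? = some each) := by
        rintro ⟨-, hlast⟩
        have : each ∈ undeliv parent hi := List.mem_of_getLast? hlast
        exact absurd (mem_undeliv parent hi each this).2 (by omega)
      rw [if_neg hfirst, if_pos hcase]
      rw [whileA_eq m each he (hi + 1) (undeliv parent hi) (by omega)]
      have hbne : beltOf m each ≠ [] := by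
        intro hn
        have h2 := belt_getLast? m each
        rw [hn, if_pos he] at h2
        simp at h2
      have hsec : (beltOf m each ≠ [] ∧ (beltOf m each).getLast? = some each) :=
        ⟨hbne, by rw [belt_getLast?, if_pos he]⟩
      rw [if_pos hsec, belt_dropLast m each he]
      have hptr' : Ptr (parent.insert each (each - 1)) each := by
        intro k v hget
        rw [PySem.Dict.get?_insert] at hget
        by_cases hk : k = each
        · rw [if_pos hk] at hget
          subst hk
          injection hget with hv
          subst hv
          exact ⟨by omega, by omega, by omega, by omega, fun y h1 h2 => absurd h1 (by omega)⟩
        · rw [if_neg hk] at hget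
          obtain ⟨c1, c2, c3, c4, c5⟩ := hptr k v hget
          refine ⟨c1, by omega, c3, c4, fun y h1 h2 => ?_⟩
          rw [PySem.Dict.contains_insert]
          simp [c5 y h1 h2]
      have hstk : undeliv (parent.insert each (each - 1)) each =
          undeliv parent hi ++ PySem.List.pyRange (hi + 1) each 1 := by
        rw [undeliv, PySem.List.pyRange_one_append 1 (hi + 1) (each + 1) (by omega) (by omega),
          List.filter_append]
        congr 1
        · rw [undeliv]
          apply List.filter_congr
          intro x hx
          have hb := (PySem.List.mem_pyRange_one).mp hx
          rw [PySem.Dict.contains_insert]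
          have : (x == each) = false := by simp; omega
          rw [this]
          simp
        · rw [PySem.List.pyRange_one_succ_right (by omega), List.filter_append]
          have h1 : (PySem.List.pyRange (hi + 1) each 1).filter
              (fun x => !(PySem.Dict.contains (parent.insert each (each - 1)) x)) =
              PySem.List.pyRange (hi + 1) each 1 := by
            apply List.filter_eq_self.mpr
            intro x hx
            have hb := (PySem.List.mem_pyRange_one).mp hx
            rw [PySem.Dict.contains_insert]
            have h2 : (x == each) = false := by simp; omega
            rw [h2, not_contains_of_gt parent hi hptr x (by omega)]
            rfl
          have h2 : ([each].filter
              (fun x => !(PySem.Dict.contains (parent.insert each (each - 1)) x))) = [] := by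
            simp [PySem.Dict.contains_insert_self]
          rw [h1, h2, List.append_nil]
      dsimp only
      rw [← hstk]
      exact ih each (parent.insert each (each - 1)) (ans + 1) (by omega) he hrest hptr'
        (fun _ => PySem.Dict.contains_insert_self parent each (each - 1))
    · -- each ≤ hi: B walks the pointer chain; A looks at the stack top
      obtain ⟨ht0, hthi, habove⟩ := find_props parent hi hptr (parent.size + 1) hi h0
      have hnc := find_not_contains parent hi hptr (parent.size + 1) hi (fuel_enough parent hi)
      set t := findB parent (parent.size + 1) hi with hts
      have hsplit := undeliv_split parent hi t ht0 hthi hnc habove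
      have hfe : t = each ∧ 0 < each ↔
          (undeliv parent hi ≠ [] ∧ (undeliv parent hi).getLast? = some each) := by
        by_cases h1t : 1 ≤ t
        · rw [hsplit, if_pos h1t]
          constructor
          · rintro ⟨hte, -⟩
            exact ⟨by simp, by rw [List.getLast?_concat, hte]⟩
          · rintro ⟨-, hlast⟩
            rw [List.getLast?_concat] at hlast
            injection hlast with h2
            exact ⟨h2, by omega⟩
        · have hemp : undeliv parent hi = [] := by
            rw [hsplit, if_neg h1t, PySem.List.pyRange_one_eq_nil (by omega : t ≤ 1)]
            simp
          rw [hemp]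
          constructor
          · rintro ⟨hte, he0⟩; omega
          · rintro ⟨hne, -⟩; exact absurd rfl hne
      by_cases hmatch : t = each ∧ 0 < each
      · obtain ⟨hte, he0⟩ := hmatch
        have h1hi : 1 ≤ hi := by omega
        have hhic : parent.contains hi = true := hcont h1hi
        have htlt : each < hi := by
          have : t ≠ hi := fun h => by rw [h, hhic] at hnc; cases hnc
          omega
        rw [if_pos (hfe.mp ⟨hte, he0⟩), if_neg hcase, if_pos ⟨hte, he0⟩]
        have hdrop : (undeliv parent hi).dropLast =
            (PySem.List.pyRange 1 t 1).filter (fun x => !(PySem.Dict.contains parent x)) := by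
          rw [hsplit, if_pos (by omega : (1:Int) ≤ t), List.dropLast_concat]
        set parent' := (parent.insert each (each - 1)).insert hi (each - 1) with hp'
        have hcont' : ∀ x : Int, PySem.Dict.contains parent' x =
            (x == hi || (x == each || parent.contains x)) := by
          intro x
          rw [hp', PySem.Dict.contains_insert, PySem.Dict.contains_insert]
        have hptr' : Ptr parent' hi := by
          intro k v hget
          rw [hp', PySem.Dict.get?_insert, PySem.Dict.get?_insert] at hget
          by_cases hk : k = hi
          · rw [if_pos hk] at hget
            injection hget with hv
            refine ⟨by omega, by omega, by omega, by omega, fun y h1 h2 => ?_⟩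
            rw [hcont' y]
            by_cases hy : y = each
            · simp [hy]
            · rw [habove y (by omega) (by omega)]
              simp
          · rw [if_neg hk] at hget
            by_cases hke : k = each
            · rw [if_pos hke] at hget
              injection hget with hv
              exact ⟨by omega, by omega, by omega, by omega, fun y h1 h2 => absurd h1 (by omega)⟩
            · rw [if_neg hke] at hget
              obtain ⟨c1, c2, c3, c4, c5⟩ := hptr k v hget
              refine ⟨c1, c2, c3, c4, fun y h1 h2 => ?_⟩
              rw [hcont' y, c5 y h1 h2]
              simp
        have hstk' : undeliv parent' hi = (undeliv parent hi).dropLast := by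
          rw [hdrop, undeliv,
            PySem.List.pyRange_one_append 1 each (hi + 1) (by omega) (by omega),
            List.filter_append]
          have hB2 : (PySem.List.pyRange each (hi + 1) 1).filter
              (fun x => !(PySem.Dict.contains parent' x)) = [] := by
            apply List.filter_eq_nil_iff.mpr
            intro x hx
            have hb := (PySem.List.mem_pyRange_one).mp hx
            rw [hcont' x]
            by_cases hxh : x = hi
            · simp [hxh]
            · by_cases hxe : x = each
              · simp [hxe]
              · rw [habove x (by omega) (by omega)]
                simp
          have hA2 : (PySem.List.pyRange 1 each 1).filter
              (fun x => !(PySem.Dict.contains parent' x)) =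
              (PySem.List.pyRange 1 t 1).filter (fun x => !(PySem.Dict.contains parent x)) := by
            rw [hte]
            apply List.filter_congr
            intro x hx
            have hb := (PySem.List.mem_pyRange_one).mp hx
            rw [hcont' x]
            have e1 : (x == hi) = false := by simp; omega
            have e2 : (x == each) = false := by simp; omega
            rw [e1, e2]
            simp
          rw [hA2, hB2, List.append_nil]
        rw [← hstk']
        exact ih hi parent' (ans + 1) h0 hm hrest hptr'
          (fun _ => PySem.Dict.contains_insert_self _ hi (each - 1))
      · rw [if_neg (fun hc => hmatch (hfe.mpr hc)), if_neg hcase, if_neg hmatch]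
        rw [whileA_noop m each (hi + 1) (by omega)]
        have hsec : ¬ (beltOf m (hi + 1) ≠ [] ∧ (beltOf m (hi + 1)).getLast? = some each) := by
          rintro ⟨-, hlast⟩
          rw [belt_getLast?] at hlast
          by_cases hhm : hi + 1 ≤ m
          · rw [if_pos hhm] at hlast
            injection hlast with h2
            omega
          · rw [if_neg hhm] at hlast
            cases hlast
        rw [if_neg hsec]

-- ===== VERDICT (by name: the statement is the Claim_ definition above) =====
theorem solution_spec : Claim_equal_solution := by
  intro order _ hpre
  unfold Spec_solution solution solution_alt
  rcases hmx : PySem.List.max? order (fun x => x) with _ | m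
  · exact absurd ((PySem.List.max?_eq_none_iff order (fun x => x)).mp hmx) hpre
  · dsimp only
    have hbd : ∀ e ∈ order, e ≤ m := fun e hme => PySem.List.max?_isMax hmx e hme
    have hinit : PySem.List.pyRange m 0 (-1) = beltOf m 1 := by
      rw [PySem.List.pyRange_neg_one_eq_reverse, beltOf]
      norm_num
    rw [hinit]
    by_cases hm0 : 0 ≤ m
    · have hemp : undeliv PySem.Dict.empty 0 = [] := by
        rw [undeliv, PySem.List.pyRange_one_eq_nil (by omega)]
        rfl
      have hptr0 : Ptr PySem.Dict.empty 0 := by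
        intro k v hget
        rw [PySem.Dict.get?_empty] at hget
        cases hget
      have := loop_eq m order 0 PySem.Dict.empty 0 (le_refl 0) hm0 hbd hptr0
        (fun h => absurd h (by omega))
      rw [hemp] at this
      norm_num at this
      exact this
    · obtain ⟨e, rest, rfl⟩ := List.exists_cons_of_ne_nil hpre
      have hem := hbd e (List.mem_cons_self)
      have hbelt : beltOf m 1 = [] := by
        rw [beltOf, PySem.List.pyRange_one_eq_nil (by omega)]
        rfl
      rw [hbelt]
      simp only [solALoop, solBLoop]
      rw [if_neg (by rintro ⟨hne, -⟩; exact hne rfl)]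
      rw [solAWhile.eq_def]
      rw [dif_neg (by simp)]
      rw [if_neg (by rintro ⟨hne, -⟩; exact hne rfl)]
      rw [if_neg (by omega : ¬ (0:Int) < e)]
      rw [if_neg (by rintro ⟨-, h0e⟩; omega)]

@[simp] theorem solution_raises : Claim_raises_solution := by
  unfold Claim_raises_solution
  exact ⟨fun order _ hr hp => hp hr, by decide⟩
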